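-- pv_equiv track=rewrite | github.com/EvaMart/ChIPseq | peak_genes_assi/peak_genes_fish.py | ClosestGene
-- ===== SOURCE A (Python) =====
-- def ClosestGene(peak_index,Genes, Chr, chro, center, TSSs):
--     genes_1Mb=[]
--     dist_1Mb=[]
--     for gene_index in range(len(Genes)):
--         if Chr[gene_index]==chro[peak_index]:
--             d=int(center[peak_index]-TSSs[gene_index])
--             if abs(d) < 1000000:
--                 genes_1Mb.append(Genes[gene_index])
--                 dist_1Mb.append(abs(d))
--     if len(dist_1Mb)>=1:
--         ind=dist_1Mb.index(min(dist_1Mb))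
--         assigned_gene=genes_1Mb[ind]
--         return(assigned_gene)
--     else:
--         return
-- ===== SOURCE B (Python) =====
-- def ClosestGene(peak_index, Genes, Chr, chro, center, TSSs):
--     best = None
--     for gene_index in range(len(Genes)):
--         if Chr[gene_index] == chro[peak_index]:
--             d = abs(int(center[peak_index] - TSSs[gene_index]))
--             if d < 1000000:
--                 if best is None or d < best[1]:
--                     best = (Genes[gene_index], d)
--     if best is not None:
--         return best[0]
-- ===== Notes on version B (the rewrite author's own statement) =====
-- stated objective: simpler
-- what changed: Replaces the two parallel accumulator lists plus the later min()/list.index()/indexing step by a single-pass running minimum (strict-less update preserves the first-occurrence tie-break), so no intermediate lists are built.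
import Mathlib
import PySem

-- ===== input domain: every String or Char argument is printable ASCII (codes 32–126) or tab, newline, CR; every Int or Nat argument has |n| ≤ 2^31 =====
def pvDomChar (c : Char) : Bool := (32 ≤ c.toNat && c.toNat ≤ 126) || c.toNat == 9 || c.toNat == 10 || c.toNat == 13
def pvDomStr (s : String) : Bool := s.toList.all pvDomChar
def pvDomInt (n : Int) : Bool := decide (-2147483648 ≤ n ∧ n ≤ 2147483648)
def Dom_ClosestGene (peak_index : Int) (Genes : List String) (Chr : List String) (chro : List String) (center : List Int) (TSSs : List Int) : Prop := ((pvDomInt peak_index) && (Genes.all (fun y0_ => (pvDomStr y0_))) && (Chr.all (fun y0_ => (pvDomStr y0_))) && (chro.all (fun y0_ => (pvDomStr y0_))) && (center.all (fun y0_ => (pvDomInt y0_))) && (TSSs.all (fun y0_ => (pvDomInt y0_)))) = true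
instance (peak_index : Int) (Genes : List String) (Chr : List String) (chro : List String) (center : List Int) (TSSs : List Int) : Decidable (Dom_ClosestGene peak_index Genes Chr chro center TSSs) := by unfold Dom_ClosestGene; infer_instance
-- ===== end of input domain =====

-- B replaces A's two parallel lists and later min()/index() lookup by a single-pass running
-- minimum (strict-less update keeps the first-occurrence tie-break); same O(n) time, O(1) space.


-- ===== PORT A =====
def ClosestGene (peak_index : Int) (Genes : List String) (Chr : List String) (chro : List String) (center : List Int) (TSSs : List Int) : Option String :=
  let st :=
    (PySem.List.pyRange 0 (Genes.length : Int) 1).foldl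
      (fun (st : List String × List Int) gene_index =>
        if PySem.List.pyGetD Chr gene_index "" = PySem.List.pyGetD chro peak_index "" then
          let d : Int := PySem.List.pyGetD center peak_index 0 - PySem.List.pyGetD TSSs gene_index 0
          if |d| < 1000000 then
            (st.1 ++ [PySem.List.pyGetD Genes gene_index ""], st.2 ++ [|d|])
          else st
        else st)
      ([], [])
  let genes_1Mb := st.1
  let dist_1Mb := st.2
  if 1 ≤ dist_1Mb.length then
    let m := (PySem.List.min? dist_1Mb (fun x => x)).getD 0        -- min(dist_1Mb); nonempty here, getD never fires
    let ind := (PySem.List.index? dist_1Mb m).getD 0               -- .index(m); m ∈ dist_1Mb here, getD never fires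
    some (PySem.List.pyGetD genes_1Mb (ind : Int) "")
  else none

-- ===== PORT B =====
def ClosestGene_alt (peak_index : Int) (Genes : List String) (Chr : List String) (chro : List String) (center : List Int) (TSSs : List Int) : Option String :=
  let best :=
    (PySem.List.pyRange 0 (Genes.length : Int) 1).foldl
      (fun (best : Option (String × Int)) gene_index =>
        if PySem.List.pyGetD Chr gene_index "" = PySem.List.pyGetD chro peak_index "" then
          let d : Int := |PySem.List.pyGetD center peak_index 0 - PySem.List.pyGetD TSSs gene_index 0|
          if d < 1000000 then
            match best with
            | none => some (PySem.List.pyGetD Genes gene_index "", d)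
            | some b => if d < b.2 then some (PySem.List.pyGetD Genes gene_index "", d) else some b
          else best
        else best)
      none
  best.map Prod.fst

-- ===== PRECONDITION & SPEC =====
-- Pre_ excludes exactly the inputs where A raises an IndexError: with Genes nonempty, peak_index
-- outside Python's (negative-wrapping) range for chro or Chr shorter than Genes; peak_index outside
-- that range for center when some gene's chromosome matches; and TSSs too short at a matching index.
def Pre_ClosestGene (peak_index : Int) (Genes : List String) (Chr : List String) (chro : List String) (center : List Int) (TSSs : List Int) : Prop :=
  (Genes ≠ [] → PySem.Raise.InRange chro.length peak_index ∧ Genes.length ≤ Chr.length) ∧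
  ((∃ i < Genes.length, Chr.getD i "" = PySem.List.pyGetD chro peak_index "") →
    PySem.Raise.InRange center.length peak_index) ∧
  ∀ i < Genes.length, Chr.getD i "" = PySem.List.pyGetD chro peak_index "" → i < TSSs.length
instance (peak_index : Int) (Genes : List String) (Chr : List String) (chro : List String) (center : List Int) (TSSs : List Int) : Decidable (Pre_ClosestGene peak_index Genes Chr chro center TSSs) := by unfold Pre_ClosestGene; infer_instance

def pvWitness_ClosestGene : Int × List String × List String × List String × List Int × List Int :=
  (0, ["g1", "g2"], ["x", "y"], ["x"], [100], [50, 40])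

def Spec_ClosestGene (peak_index : Int) (Genes : List String) (Chr : List String) (chro : List String) (center : List Int) (TSSs : List Int) (out : Option String) : Prop := out = ClosestGene_alt peak_index Genes Chr chro center TSSs
instance (peak_index : Int) (Genes : List String) (Chr : List String) (chro : List String) (center : List Int) (TSSs : List Int) (out : Option String) : Decidable (Spec_ClosestGene peak_index Genes Chr chro center TSSs out) := by unfold Spec_ClosestGene; infer_instance

-- ===== CLAIM (what is proved, stated in full; the proofs are below) =====
def Claim_equal_ClosestGene : Prop := ∀ (peak_index : Int) (Genes : List String) (Chr : List String) (chro : List String) (center : List Int) (TSSs : List Int), Dom_ClosestGene peak_index Genes Chr chro center TSSs → Pre_ClosestGene peak_index Genes Chr chro center TSSs → Spec_ClosestGene peak_index Genes Chr chro center TSSs (ClosestGene peak_index Genes Chr chro center TSSs)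

-- ===== LEMMAS AND PROOFS =====

def pvQuals (cv : String) (cp : Int) (Genes Chr : List String) (TSSs : List Int) : List (String × Int) :=
  (List.range Genes.length).filterMap (fun i =>
    if Chr.getD i "" = cv then
      if |cp - TSSs.getD i 0| < 1000000 then some (Genes.getD i "", |cp - TSSs.getD i 0|) else none
    else none)

def pvStep (best : Option (String × Int)) (p : String × Int) : Option (String × Int) :=
  match best with
  | none => some p
  | some b => if p.2 < b.2 then some p else some b

def pvFm (q : String × Int) : List (String × Int) → String × Int
  | [] => q
  | p :: ps => if p.2 < q.2 then pvFm p ps else pvFm q ps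

theorem pvFoldAGen (cv : String) (cp : Int) (Genes Chr : List String) (TSSs : List Int)
    (n : Nat) (gs : List String) (ds : List Int) :
    (List.range n).foldl
      (fun (st : List String × List Int) (i : Nat) =>
        if Chr.getD i "" = cv then
          if |cp - TSSs.getD i 0| < 1000000 then
            (st.1 ++ [Genes.getD i ""], st.2 ++ [|cp - TSSs.getD i 0|])
          else st
        else st) (gs, ds)
    = (gs ++ (((List.range n).filterMap (fun i =>
        if Chr.getD i "" = cv then
          if |cp - TSSs.getD i 0| < 1000000 then some (Genes.getD i "", |cp - TSSs.getD i 0|) else none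
        else none)).map Prod.fst),
       ds ++ (((List.range n).filterMap (fun i =>
        if Chr.getD i "" = cv then
          if |cp - TSSs.getD i 0| < 1000000 then some (Genes.getD i "", |cp - TSSs.getD i 0|) else none
        else none)).map Prod.snd)) := by
  induction n with
  | zero => simp
  | succ n ih =>
    rw [List.range_succ, List.foldl_append, List.filterMap_append, ih]
    simp only [List.foldl_cons, List.foldl_nil, List.filterMap_cons, List.filterMap_nil]
    split_ifs <;> simp

theorem pvFoldBGen (cv : String) (cp : Int) (Genes Chr : List String) (TSSs : List Int)
    (n : Nat) (b0 : Option (String × Int)) :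
    (List.range n).foldl
      (fun (best : Option (String × Int)) (i : Nat) =>
        if Chr.getD i "" = cv then
          if |cp - TSSs.getD i 0| < 1000000 then
            pvStep best (Genes.getD i "", |cp - TSSs.getD i 0|)
          else best
        else best) b0
    = ((List.range n).filterMap (fun i =>
        if Chr.getD i "" = cv then
          if |cp - TSSs.getD i 0| < 1000000 then some (Genes.getD i "", |cp - TSSs.getD i 0|) else none
        else none)).foldl pvStep b0 := by
  induction n with
  | zero => simp
  | succ n ih =>
    rw [List.range_succ, List.foldl_append, List.filterMap_append, List.foldl_append, ih]
    simp only [List.foldl_cons, List.foldl_nil, List.filterMap_cons, List.filterMap_nil]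
    split_ifs <;> simp

theorem pvFoldStep (q : String × Int) (ps : List (String × Int)) :
    ps.foldl pvStep (some q) = some (pvFm q ps) := by
  induction ps generalizing q with
  | nil => rfl
  | cons p ps ih =>
    simp only [List.foldl_cons, pvStep, pvFm]
    split_ifs <;> simp [ih]

theorem pvFm_eq_self (q : String × Int) (ps : List (String × Int)) (hall : ∀ x ∈ ps, ¬ x.2 < q.2) :
    pvFm q ps = q := by
  induction ps with
  | nil => rfl
  | cons r rs ihr =>
    simp only [pvFm]
    rw [if_neg (hall r (by simp))]
    exact ihr (fun x hx => hall x (by simp [hx]))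

theorem pvL (q : String × Int) (ps : List (String × Int)) :
    ∃ k, PySem.List.index? ((q :: ps).map Prod.snd) ((ps.map Prod.snd).foldl min q.2) = some k ∧
      ((q :: ps).map Prod.fst).getD k "" = (pvFm q ps).1 := by
  induction ps generalizing q with
  | nil =>
    exact ⟨0, by simp, rfl⟩
  | cons p ps ih =>
    simp only [List.map_cons, List.foldl_cons, pvFm]
    by_cases hlt : p.2 < q.2
    · -- min q.2 p.2 = p.2, and q.2 never equals the overall min (m ≤ p.2 < q.2)
      rw [if_pos hlt]
      obtain ⟨k, hk, hg⟩ := ih p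
      have hm : (ps.map Prod.snd).foldl min (min q.2 p.2) = (ps.map Prod.snd).foldl min p.2 := by
        rw [min_eq_right hlt.le]
      have hne : q.2 ≠ (ps.map Prod.snd).foldl min p.2 := by
        have := (PySem.List.foldl_min_le (ps.map Prod.snd) p.2).1
        omega
      refine ⟨k + 1, ?_, ?_⟩
      · rw [hm, PySem.List.index?_cons_of_ne _ hne]
        simp only [List.map_cons] at hk
        rw [hk]; rfl
      · simpa using hg
    · rw [if_neg hlt]
      have hqp : min q.2 p.2 = q.2 := min_eq_left (by omega)
      rw [hqp]
      by_cases hq : q.2 = (ps.map Prod.snd).foldl min q.2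
      · -- head is the min: index 0, and pvFm q ps = q since nothing beats q
        refine ⟨0, by rw [← hq]; exact PySem.List.index?_cons_self _ _, ?_⟩
        have hall : ∀ x ∈ ps, ¬ x.2 < q.2 := by
          intro x hx hxlt
          have := (PySem.List.foldl_min_le (ps.map Prod.snd) q.2).2 x.2 (List.mem_map_of_mem hx)
          omega
        simp [pvFm_eq_self q ps hall]
      · obtain ⟨k, hk, hg⟩ := ih q
        have hmle : (ps.map Prod.snd).foldl min q.2 ≤ q.2 := (PySem.List.foldl_min_le _ _).1
        have hne2 : p.2 ≠ (ps.map Prod.snd).foldl min q.2 := by omega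
        have hne1 : q.2 ≠ (ps.map Prod.snd).foldl min q.2 := hq
        -- relate index? in (q.2 :: p.2 :: rest) with index? in (q.2 :: rest)
        simp only [List.map_cons] at hk
        rw [PySem.List.index?_cons_of_ne _ hne1] at hk
        cases hidx : PySem.List.index? (ps.map Prod.snd) ((ps.map Prod.snd).foldl min q.2) with
        | none => rw [hidx] at hk; simp at hk
        | some j =>
          rw [hidx] at hk
          simp at hk
          refine ⟨j + 2, ?_, ?_⟩
          · rw [PySem.List.index?_cons_of_ne _ hne1, PySem.List.index?_cons_of_ne _ hne2, hidx]; rfl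
          · subst hk
            simpa using hg


theorem pvA_quals (peak_index : Int) (Genes Chr chro : List String) (center TSSs : List Int) :
    ClosestGene peak_index Genes Chr chro center TSSs =
      (let ps := pvQuals (PySem.List.pyGetD chro peak_index "") (PySem.List.pyGetD center peak_index 0) Genes Chr TSSs
       if 1 ≤ (ps.map Prod.snd).length then
         let m := (PySem.List.min? (ps.map Prod.snd) (fun x => x)).getD 0
         let ind := (PySem.List.index? (ps.map Prod.snd) m).getD 0
         some (PySem.List.pyGetD (ps.map Prod.fst) (ind : Int) "")
       else none) := by
  unfold ClosestGene
  rw [PySem.List.pyRange_zero_natCast, List.foldl_map]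
  simp only [PySem.List.pyGetD_natCast]
  rw [pvFoldAGen]
  rfl

theorem pvB_quals (peak_index : Int) (Genes Chr chro : List String) (center TSSs : List Int) :
    ClosestGene_alt peak_index Genes Chr chro center TSSs =
      ((pvQuals (PySem.List.pyGetD chro peak_index "") (PySem.List.pyGetD center peak_index 0) Genes Chr TSSs).foldl pvStep none).map Prod.fst := by
  unfold ClosestGene_alt
  rw [PySem.List.pyRange_zero_natCast, List.foldl_map]
  simp only [PySem.List.pyGetD_natCast]
  rw [show (fun (best : Option (String × Int)) (i : Nat) =>
        if Chr.getD i "" = PySem.List.pyGetD chro peak_index "" then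
          let d : Int := |PySem.List.pyGetD center peak_index 0 - TSSs.getD i 0|
          if d < 1000000 then
            match best with
            | none => some (Genes.getD i "", d)
            | some b => if d < b.2 then some (Genes.getD i "", d) else some b
          else best
        else best)
      = (fun (best : Option (String × Int)) (i : Nat) =>
        if Chr.getD i "" = PySem.List.pyGetD chro peak_index "" then
          if |PySem.List.pyGetD center peak_index 0 - TSSs.getD i 0| < 1000000 then
            pvStep best (Genes.getD i "", |PySem.List.pyGetD center peak_index 0 - TSSs.getD i 0|)
          else best
        else best) from by
      funext best i
      simp only [pvStep]]
  rw [pvFoldBGen]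
  rfl

theorem main_eq (peak_index : Int) (Genes Chr chro : List String) (center TSSs : List Int) :
    ClosestGene peak_index Genes Chr chro center TSSs = ClosestGene_alt peak_index Genes Chr chro center TSSs := by
  rw [pvA_quals, pvB_quals]
  cases hq : pvQuals (PySem.List.pyGetD chro peak_index "") (PySem.List.pyGetD center peak_index 0) Genes Chr TSSs with
  | nil => simp
  | cons q ps =>
    simp only [List.map_cons, List.length_cons]
    rw [if_pos (by omega)]
    rw [List.foldl_cons]
    have hstep0 : pvStep none q = some q := rfl
    rw [hstep0, pvFoldStep]
    have hmin := PySem.List.min?_id_cons q.2 (ps.map Prod.snd)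
    rw [show (q.2 :: ps.map Prod.snd) = ((q :: ps).map Prod.snd) from rfl] at hmin
    obtain ⟨k, hk, hg⟩ := pvL q ps
    simp only [List.map_cons] at hmin hk ⊢
    rw [hmin]
    simp only [Option.getD_some]
    rw [hk]
    simp only [Option.getD_some, Option.map_some]
    rw [PySem.List.pyGetD_natCast]
    simp only [List.map_cons] at hg
    rw [hg]

-- ===== VERDICT (by name: the statement is the Claim_ definition above) =====
theorem ClosestGene_spec : Claim_equal_ClosestGene := by
  intro peak_index Genes Chr chro center TSSs _ _
  unfold Spec_ClosestGene
  exact main_eq peak_index Genes Chr chro center TSSs
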